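-- pv_equiv track=rewrite | github.com/codewithshubham/pre-int-screening | functions/word_count_sorted.py | check_word_count
-- ===== SOURCE A (Python) =====
-- def check_word_count(words):
--
--     word_split = words.lower().split(" ")  # Generate individual words and store it in list
--     word_split = [word.strip() for word in word_split if word.strip()]   # Added code to update list of words without whitespcaes
--     word_frequency = {}
--
--     for word in sorted(word_split) :
--         if word not in word_frequency :
--             word_frequency[word] = 1
--         else:
--             word_frequency[word] = word_frequency[word] + 1
--
--     return(word_frequency)
-- ===== SOURCE B (Python) =====
-- def check_word_count(words):
--     toks = sorted(t for t in (w.strip() for w in words.lower().split(" ")) if t)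
--     out = {}
--     prev = None
--     run = 0
--     for t in toks:
--         if t == prev:
--             run += 1
--         else:
--             if prev is not None:
--                 out[prev] = run
--             prev = t
--             run = 1
--     if prev is not None:
--         out[prev] = run
--     return out
-- ===== Notes on version B (the rewrite author's own statement) =====
-- stated objective: alternative
-- what changed: A counts via a frequency table (per-token dict membership test and lookup over the sorted list); B run-length-encodes the sorted token list with a prev/run accumulator, inserting each distinct word exactly once with its final run length, so no per-token dictionary lookups occur.
import Mathlib
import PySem

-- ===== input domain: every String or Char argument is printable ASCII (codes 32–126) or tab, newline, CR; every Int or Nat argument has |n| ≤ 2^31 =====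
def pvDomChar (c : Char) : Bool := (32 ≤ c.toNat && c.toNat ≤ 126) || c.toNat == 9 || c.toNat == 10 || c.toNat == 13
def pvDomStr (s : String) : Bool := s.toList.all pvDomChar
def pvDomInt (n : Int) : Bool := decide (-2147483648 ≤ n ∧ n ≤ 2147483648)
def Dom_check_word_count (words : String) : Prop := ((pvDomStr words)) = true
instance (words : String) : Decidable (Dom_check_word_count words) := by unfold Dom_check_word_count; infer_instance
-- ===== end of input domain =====

-- B replaces A's frequency table (per-token dict membership test + lookup over the sorted
-- tokens) by a run-length encoding of the sorted token list with a prev/run accumulator,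
-- inserting each distinct word once with its run length; same value, same cost class.

-- ===== PORT A =====
def check_word_count (words : String) : List (String × Int) :=
  -- words.lower().split(" "): the separator is the nonempty literal " ", so split? is some
  let word_split := (PySem.Str.split? (PySem.Str.lower words) " ").getD []
  let word_split := (word_split.filter (fun w => !(PySem.Str.strip w == ""))).map PySem.Str.strip
  let word_frequency :=
    (PySem.List.sorted word_split (fun w => w) false).foldl
      (fun d w =>
        if !(d.contains w) then d.insert w 1
        else d.insert w (d.getD w 0 + 1))
      PySem.Dict.empty
  word_frequency.items

-- ===== PORT B =====
-- the body of Source B's for-loop: state is (out, prev, run); 't == prev' with prev = None is False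
def pvStepB (s : PySem.Dict String Int × Option String × Int) (t : String) :
    PySem.Dict String Int × Option String × Int :=
  if some t == s.2.1 then (s.1, s.2.1, s.2.2 + 1)
  else match s.2.1 with
    | none => (s.1, some t, 1)
    | some p => (s.1.insert p s.2.2, some t, 1)

-- Source B's trailing 'if prev is not None: out[prev] = run'
def pvFinishB (s : PySem.Dict String Int × Option String × Int) : PySem.Dict String Int :=
  match s.2.1 with
  | none => s.1
  | some p => s.1.insert p s.2.2

def check_word_count_alt (words : String) : List (String × Int) :=
  let toks := PySem.List.sorted
      ((((PySem.Str.split? (PySem.Str.lower words) " ").getD []).map PySem.Str.strip).filter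
        (fun t => !(t == ""))) (fun t => t) false
  (pvFinishB (toks.foldl pvStepB (PySem.Dict.empty, none, 0))).items

-- ===== PRECONDITION & SPEC =====
def Spec_check_word_count (words : String) (out : List (String × Int)) : Prop := out = check_word_count_alt words
instance (words : String) (out : List (String × Int)) : Decidable (Spec_check_word_count words out) := by unfold Spec_check_word_count; infer_instance

-- ===== CLAIM (what is proved, stated in full; the proofs are below) =====
def Claim_equal_check_word_count : Prop := ∀ (words : String), Dom_check_word_count words → Spec_check_word_count words (check_word_count words)

-- ===== LEMMAS AND PROOFS =====

-- strip-then-filter (Source B) builds the same token list as filter-then-strip (Source A)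
theorem pv_tokens (l : List String) :
    (l.map PySem.Str.strip).filter (fun t => !(t == ""))
      = (l.filter (fun w => !(PySem.Str.strip w == ""))).map PySem.Str.strip := by
  induction l with
  | nil => rfl
  | cons w l ih =>
    by_cases h : PySem.Str.strip w = "" <;> simp [h, ih]

-- run-length encoding of a list, current run (p, r) in front
def pvRleAux : String → Int → List String → List (String × Int)
  | p, r, [] => [(p, r)]
  | p, r, x :: xs => if x = p then pvRleAux p (r + 1) xs else (p, r) :: pvRleAux x 1 xs

-- A's counting loop over a sorted remainder appends the run-length encoding
theorem pvA_rle (l : List String) (d : PySem.Dict String Int) (p : String) (r : Int)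
    (hp : d.contains p = false)
    (hl : ∀ x ∈ l, d.contains x = false ∧ p ≤ x)
    (hsort : l.Pairwise (fun a b : String => a ≤ b)) :
    (l.foldl (fun d w => if !(d.contains w) then d.insert w 1
                         else d.insert w (d.getD w 0 + 1)) (d.insert p r)).items
      = d.items ++ pvRleAux p r l := by
  induction l generalizing d p r with
  | nil => simp [pvRleAux, PySem.Dict.items_insert_of_not_contains _ _ hp]
  | cons x xs ih =>
    rcases hl x (List.mem_cons_self ..) with ⟨hxd, hpx⟩
    by_cases hx : x = p
    · subst hx
      have e1 : ((d.insert x r).contains x) = true := PySem.Dict.contains_insert_self ..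
      have e2 : (d.insert x r).getD x 0 = r := PySem.Dict.getD_insert_self ..
      simp only [List.foldl_cons, e1, e2, Bool.not_true, Bool.false_eq_true, if_false,
        PySem.Dict.insert_insert_self]
      rw [ih d x (r + 1) hp
        (fun y hy => ⟨(hl y (List.mem_cons_of_mem _ hy)).1, List.rel_of_pairwise_cons hsort hy⟩)
        hsort.tail]
      simp [pvRleAux]
    · have e1 : ((d.insert p r).contains x) = false := by
        rw [PySem.Dict.contains_insert]
        simp [hx, hxd]
      simp only [List.foldl_cons, e1, Bool.not_false, if_true]
      have hplt : p < x := lt_of_le_of_ne hpx (fun h => hx h.symm)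
      rw [ih (d.insert p r) x 1 e1
        (fun y hy => by
          refine ⟨?_, List.rel_of_pairwise_cons hsort hy⟩
          rw [PySem.Dict.contains_insert]
          have hxy : x ≤ y := List.rel_of_pairwise_cons hsort hy
          have : y ≠ p := fun h => absurd (h ▸ hxy) (not_le.mpr hplt)
          simp [this, (hl y (List.mem_cons_of_mem _ hy)).1])
        hsort.tail]
      rw [PySem.Dict.items_insert_of_not_contains _ _ hp]
      simp [pvRleAux, hx]

-- B's run loop over a sorted remainder appends the same run-length encoding
theorem pvB_rle (l : List String) (d : PySem.Dict String Int) (p : String) (r : Int)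
    (hp : d.contains p = false)
    (hl : ∀ x ∈ l, d.contains x = false ∧ p ≤ x)
    (hsort : l.Pairwise (fun a b : String => a ≤ b)) :
    (pvFinishB (l.foldl pvStepB (d, some p, r))).items = d.items ++ pvRleAux p r l := by
  induction l generalizing d p r with
  | nil =>
    simp [pvFinishB, pvRleAux, PySem.Dict.items_insert_of_not_contains _ _ hp]
  | cons x xs ih =>
    rcases hl x (List.mem_cons_self ..) with ⟨hxd, hpx⟩
    by_cases hx : x = p
    · subst hx
      have e1 : pvStepB (d, some x, r) x = (d, some x, r + 1) := by
        simp [pvStepB]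
      rw [List.foldl_cons, e1,
        ih d x (r + 1) hp
          (fun y hy => ⟨(hl y (List.mem_cons_of_mem _ hy)).1, List.rel_of_pairwise_cons hsort hy⟩)
          hsort.tail]
      simp [pvRleAux]
    · have e1 : pvStepB (d, some p, r) x = (d.insert p r, some x, 1) := by
        simp [pvStepB, hx]
      have e2 : ((d.insert p r).contains x) = false := by
        rw [PySem.Dict.contains_insert]
        simp [hx, hxd]
      have hplt : p < x := lt_of_le_of_ne hpx (fun h => hx h.symm)
      rw [List.foldl_cons, e1,
        ih (d.insert p r) x 1 e2
          (fun y hy => by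
            refine ⟨?_, List.rel_of_pairwise_cons hsort hy⟩
            rw [PySem.Dict.contains_insert]
            have hxy : x ≤ y := List.rel_of_pairwise_cons hsort hy
            have : y ≠ p := fun h => absurd (h ▸ hxy) (not_le.mpr hplt)
            simp [this, (hl y (List.mem_cons_of_mem _ hy)).1])
          hsort.tail]
      rw [PySem.Dict.items_insert_of_not_contains _ _ hp]
      simp [pvRleAux, hx]

-- both ports, applied to the same token list, produce the RLE of its sorted order
theorem pv_main (ts : List String) :
    ((PySem.List.sorted ts (fun w => w) false).foldl
       (fun d w => if !(d.contains w) then d.insert w 1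
                   else d.insert w (d.getD w 0 + 1)) PySem.Dict.empty).items
      = (pvFinishB ((PySem.List.sorted ts (fun w => w) false).foldl pvStepB
          (PySem.Dict.empty, none, 0))).items := by
  have hpw := PySem.List.sorted_pairwise ts (fun w => w)
  cases hs : PySem.List.sorted ts (fun w => w) false with
  | nil => simp [pvFinishB]
  | cons x xs =>
    rw [hs] at hpw
    have hA1 : (PySem.Dict.empty (κ := String) (ν := Int)).contains x = false :=
      PySem.Dict.contains_empty ..
    have stepA : (if !((PySem.Dict.empty (κ := String) (ν := Int)).contains x)
        then PySem.Dict.empty.insert x 1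
        else PySem.Dict.empty.insert x ((PySem.Dict.empty (κ := String) (ν := Int)).getD x 0 + 1))
        = (PySem.Dict.empty (κ := String) (ν := Int)).insert x 1 := by
      simp [hA1]
    have hside : ∀ y ∈ xs, (PySem.Dict.empty (κ := String) (ν := Int)).contains y = false ∧ x ≤ y :=
      fun y hy => ⟨PySem.Dict.contains_empty .., List.rel_of_pairwise_cons hpw hy⟩
    have e1 : pvStepB (PySem.Dict.empty, none, 0) x = (PySem.Dict.empty, some x, 1) := by
      simp [pvStepB]
    rw [List.foldl_cons, List.foldl_cons, stepA, e1,
      pvA_rle xs PySem.Dict.empty x 1 hA1 hside hpw.tail,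
      pvB_rle xs PySem.Dict.empty x 1 hA1 hside hpw.tail]

-- ===== VERDICT (by name: the statement is the Claim_ definition above) =====
theorem check_word_count_spec : Claim_equal_check_word_count := by
  intro words _
  unfold Spec_check_word_count check_word_count check_word_count_alt
  simp only [pv_tokens]
  exact pv_main _
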